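-- pv_equiv track=rewrite | github.com/2017215214/GraphRAG-Reproduction-Attempt | operators/utils.py | split_by_multimarkers
-- ===== SOURCE A (Python) =====
-- def split_by_multimarkers(text: str, record_delimiter: str, completion_delimiter: str) -> list[str]:
--     """
--     根据记录分隔符和完成分隔符将文本分割成记录列表，增强容错性
--     """
--     # 首先按完成分隔符分割，取第一部分
--     parts = text.split(completion_delimiter)
--     main_content = parts[0] if len(parts) > 1 else text
--
--     # 按记录分隔符分割
--     records = main_content.split(record_delimiter)
--
--     # 清理并修复不完整的记录
--     cleaned_records = []
--     for i, record in enumerate(records):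
--         record = record.strip()
--         if not record:
--             continue
--
--         # 检查记录是否包含不完整的实体定义
--         # 如果记录中间出现 ("entity" 或 ("relationship"，说明格式有问题
--         if '("entity"' in record[10:] or '("relationship"' in record[10:]:  # 排除开头的正常情况
--             # 尝试修复：在第一个 ( 前截断
--             if record.startswith('("'):
--                 # 找到第一个不完整实体的位置
--                 next_entity_pos = max(
--                     record.find('("entity"', 10),
--                     record.find('("relationship"', 10)
--                 )
--                 if next_entity_pos > 0:
--                     # 截断到不完整实体之前，并添加结束符
--                     truncated = record[:next_entity_pos].rstrip()
--                     if not truncated.endswith('")'):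
--                         truncated += '")'
--                     cleaned_records.append(truncated)
--
--                     # 处理剩余部分作为新记录
--                     remaining = record[next_entity_pos:]
--                     if remaining.strip():
--                         records.insert(i + 1, remaining)
--                     continue
--
--         cleaned_records.append(record)
--
--     return cleaned_records
-- ===== SOURCE B (Python) =====
-- def _close(seg):
--     """Format one truncated segment: trim the right end and ensure it closes with '\")'."""
--     t = seg.rstrip()
--     return t if t.endswith('")') else t + '")'
--
--
-- def _stray_pos(s):
--     """Position of the first stray ("entity"/("relationship marker inside a repairable record, else -1."""
--     if ('("entity"' in s[10:] or '("relationship"' in s[10:]) and s.startswith('("'):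
--         p = max(s.find('("entity"', 10), s.find('("relationship"', 10))
--         if p > 0:
--             return p
--     return -1
--
--
-- def _segments(s):
--     """Phase 1: cut a stripped record at every stray marker; return (truncated segments, final tail)."""
--     segs = []
--     p = _stray_pos(s)
--     while p > 0:
--         segs.append(s[:p])
--         s = s[p:].strip()
--         p = _stray_pos(s)
--     return segs, s
--
--
-- def split_by_multimarkers(text: str, record_delimiter: str, completion_delimiter: str) -> list[str]:
--     parts = text.split(completion_delimiter)
--     main_content = parts[0] if len(parts) > 1 else text
--     out = []
--     for record in main_content.split(record_delimiter):
--         record = record.strip()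
--         if not record:
--             continue
--         segs, last = _segments(record)
--         out.extend(_close(seg) for seg in segs)
--         if last:
--             out.append(last)
--     return out
-- ===== Notes on version B (the rewrite author's own statement) =====
-- stated objective: simpler
-- what changed: A repairs records by mutating the list it is enumerating (records.insert(i+1, remaining) so the remainder is revisited); B uses a two-phase per-record design: a _segments pass that only computes the cut points (stray '("entity"/("relationship' markers) and collects raw segments plus the final tail, then a _close formatting pass applied to the segments, with no list mutation.
import Mathlib
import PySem

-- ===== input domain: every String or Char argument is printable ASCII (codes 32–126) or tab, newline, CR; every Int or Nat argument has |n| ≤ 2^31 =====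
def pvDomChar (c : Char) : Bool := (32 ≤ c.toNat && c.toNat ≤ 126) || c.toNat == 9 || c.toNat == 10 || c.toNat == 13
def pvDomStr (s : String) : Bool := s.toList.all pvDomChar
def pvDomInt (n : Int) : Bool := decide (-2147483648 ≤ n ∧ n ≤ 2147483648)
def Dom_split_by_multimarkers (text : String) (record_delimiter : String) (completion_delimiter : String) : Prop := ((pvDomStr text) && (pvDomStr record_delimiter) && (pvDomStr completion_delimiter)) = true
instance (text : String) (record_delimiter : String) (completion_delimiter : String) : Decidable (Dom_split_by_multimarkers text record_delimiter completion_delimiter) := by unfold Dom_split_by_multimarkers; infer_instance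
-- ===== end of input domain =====

-- B replaces A's in-place `records.insert(i+1, remaining)` self-mutating enumerate loop by a
-- two-phase repair per record (cut positions first, then formatting); objective: simpler.

-- shared string constants of both Pythons
def pvEnt : List Char := "(\"entity\"".toList
def pvRel : List Char := "(\"relationship\"".toList
def pvOpen : List Char := "(\"".toList
def pvQEnd : List Char := "\")".toList

-- strip never lengthens a string (used only for termination)
theorem pv_strip_len_le (s : List Char) : (PySem.Chars.strip s).length ≤ s.length := by
  simp only [PySem.Chars.strip, PySem.Chars.lstrip, PySem.Chars.rstrip, List.length_reverse]
  calc (List.dropWhile PySem.Chars.isspace (List.dropWhile PySem.Chars.isspace s).reverse).length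
      ≤ (List.dropWhile PySem.Chars.isspace s).reverse.length := List.length_dropWhile_le _ _
    _ ≤ s.length := by simpa using List.length_dropWhile_le PySem.Chars.isspace s

-- the remainder record[p:] (p > 0) of a nonempty stripped record is shorter than the raw record
theorem pv_rem_lt (r : List Char) (p : Int) (hp : 0 < p) (hne : ¬ PySem.Chars.strip r = []) :
    (PySem.List.slice (PySem.Chars.strip r) (some p) none).length < r.length := by
  rw [PySem.List.slice_some_none, List.length_drop]
  have h2 := pv_strip_len_le r
  have h3 : 0 < (PySem.Chars.strip r).length := List.length_pos_of_ne_nil hne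
  have h1 : 1 ≤ PySem.List.clampIdx (PySem.Chars.strip r).length p := by
    unfold PySem.List.clampIdx
    have hnlt : ¬ p < 0 := by omega
    simp only [hnlt, if_false, le_min_iff]
    omega
  omega

-- the tail s[p:].strip() handed to the next phase-1 step is shorter than a nonempty s
theorem pv_tail_lt (s : List Char) (p : Int) (hp : 0 < p) (hne : s ≠ []) :
    (PySem.Chars.strip (PySem.List.slice s (some p) none)).length < s.length := by
  have h0 := pv_strip_len_le (PySem.List.slice s (some p) none)
  rw [PySem.List.slice_some_none, List.length_drop] at *
  have h3 : 0 < s.length := List.length_pos_of_ne_nil hne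
  have h1 : 1 ≤ PySem.List.clampIdx s.length p := by
    unfold PySem.List.clampIdx
    have hnlt : ¬ p < 0 := by omega
    simp only [hnlt, if_false, le_min_iff]
    omega
  omega

-- ===== PORT A =====
-- A's `for i, record in enumerate(records)` loop with `records.insert(i + 1, remaining)`:
-- the inserted remainder is exactly the element visited next, so the loop over the suffix
-- of `records` is this recursion, which pushes `remaining` in front of the untouched tail.
def pvA_loop : List (List Char) → List (List Char)
  | [] => []
  | r :: rest =>
    if hrec : PySem.Chars.strip r = [] then pvA_loop rest
    else if PySem.Chars.isIn pvEnt (PySem.List.slice (PySem.Chars.strip r) (some 10) none)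
         || PySem.Chars.isIn pvRel (PySem.List.slice (PySem.Chars.strip r) (some 10) none) then
      if PySem.Chars.startswith (PySem.Chars.strip r) pvOpen then
        if hp : 0 < max (PySem.Chars.findFrom (PySem.Chars.strip r) pvEnt 10)
                        (PySem.Chars.findFrom (PySem.Chars.strip r) pvRel 10) then
          let t0 := PySem.Chars.rstrip (PySem.List.slice (PySem.Chars.strip r) none
            (some (max (PySem.Chars.findFrom (PySem.Chars.strip r) pvEnt 10)
                       (PySem.Chars.findFrom (PySem.Chars.strip r) pvRel 10))))
          let t := if PySem.Chars.endswith t0 pvQEnd then t0 else t0 ++ pvQEnd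
          if PySem.Chars.strip (PySem.List.slice (PySem.Chars.strip r)
              (some (max (PySem.Chars.findFrom (PySem.Chars.strip r) pvEnt 10)
                         (PySem.Chars.findFrom (PySem.Chars.strip r) pvRel 10))) none) ≠ [] then
            t :: pvA_loop ((PySem.List.slice (PySem.Chars.strip r)
              (some (max (PySem.Chars.findFrom (PySem.Chars.strip r) pvEnt 10)
                         (PySem.Chars.findFrom (PySem.Chars.strip r) pvRel 10))) none) :: rest)
          else
            t :: pvA_loop rest
        else PySem.Chars.strip r :: pvA_loop rest
      else PySem.Chars.strip r :: pvA_loop rest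
    else PySem.Chars.strip r :: pvA_loop rest
termination_by rs => (rs.map (fun s => s.length + 1)).sum
decreasing_by
  · simp only [List.map_cons, List.sum_cons]; omega
  · simp only [List.map_cons, List.sum_cons]
    have := pv_rem_lt r _ hp hrec
    omega
  · simp only [List.map_cons, List.sum_cons]; omega
  · simp only [List.map_cons, List.sum_cons]; omega
  · simp only [List.map_cons, List.sum_cons]; omega
  · simp only [List.map_cons, List.sum_cons]; omega

def split_by_multimarkers (text : String) (record_delimiter : String) (completion_delimiter : String) : List String :=
  match PySem.Str.split? text completion_delimiter with
  | none => []   -- text.split('') raises ValueError; excluded by Pre_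
  | some parts =>
    let main_content := if parts.length > 1 then (PySem.List.pyGet? parts 0).getD "" else text
    match PySem.Str.split? main_content record_delimiter with
    | none => []   -- raises; excluded by Pre_
    | some records => (pvA_loop (records.map String.toList)).map (fun cs => String.ofList cs)

-- ===== PORT B =====
-- B's `_stray_pos`: index of the first stray marker in a repairable record, else -1
def pvStray (s : List Char) : Int :=
  if (PySem.Chars.isIn pvEnt (PySem.List.slice s (some 10) none)
      || PySem.Chars.isIn pvRel (PySem.List.slice s (some 10) none))
      && PySem.Chars.startswith s pvOpen then
    let p := max (PySem.Chars.findFrom s pvEnt 10) (PySem.Chars.findFrom s pvRel 10)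
    if 0 < p then p else -1
  else -1

-- B's `_close`: trim the right end and ensure the segment closes with '")'
def pvClose (seg : List Char) : List Char :=
  let t := PySem.Chars.rstrip seg
  if PySem.Chars.endswith t pvQEnd then t else t ++ pvQEnd

-- B's `_segments` (phase 1): cut a stripped record at every stray marker
def pvSegments (s : List Char) : List (List Char) × List Char :=
  if h : 0 < pvStray s then
    let res := pvSegments (PySem.Chars.strip (PySem.List.slice s (some (pvStray s)) none))
    (PySem.List.slice s none (some (pvStray s)) :: res.1, res.2)
  else ([], s)
termination_by s.length
decreasing_by
  exact pv_tail_lt s (pvStray s) h (fun he => by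
    rw [he, show pvStray ([] : List Char) = -1 from by decide] at h; omega)

def split_by_multimarkers_alt (text : String) (record_delimiter : String) (completion_delimiter : String) : List String :=
  match PySem.Str.split? text completion_delimiter with
  | none => []   -- raises; excluded by Pre_
  | some parts =>
    let main_content := if parts.length > 1 then (PySem.List.pyGet? parts 0).getD "" else text
    match PySem.Str.split? main_content record_delimiter with
    | none => []   -- raises; excluded by Pre_
    | some records =>
      (records.foldl (fun out r =>
        out ++
          (let s := PySem.Chars.strip r.toList
           if s = [] then []
           else (pvSegments s).1.map pvClose ++
                (if (pvSegments s).2 = [] then [] else [(pvSegments s).2]))) []).map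
        (fun cs => String.ofList cs)

-- ===== PRECONDITION & SPEC =====
-- str.split raises ValueError on an empty separator, so both delimiters must be nonempty
def Pre_split_by_multimarkers (text : String) (record_delimiter : String) (completion_delimiter : String) : Prop :=
  record_delimiter ≠ "" ∧ completion_delimiter ≠ ""
instance (text : String) (record_delimiter : String) (completion_delimiter : String) : Decidable (Pre_split_by_multimarkers text record_delimiter completion_delimiter) := by unfold Pre_split_by_multimarkers; infer_instance

def pvWitness_split_by_multimarkers : String × String × String :=
  ("(\"entity\"|a|b) (\"relationship\"|a|b|r)##(\"entity\"|c|d)<|COMPLETE|>junk", "##", "<|COMPLETE|>")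

def Spec_split_by_multimarkers (text : String) (record_delimiter : String) (completion_delimiter : String) (out : List String) : Prop := out = split_by_multimarkers_alt text record_delimiter completion_delimiter
instance (text : String) (record_delimiter : String) (completion_delimiter : String) (out : List String) : Decidable (Spec_split_by_multimarkers text record_delimiter completion_delimiter out) := by unfold Spec_split_by_multimarkers; infer_instance

-- ===== CLAIM (what is proved, stated in full; the proofs are below) =====
def Claim_equal_split_by_multimarkers : Prop := ∀ (text : String) (record_delimiter : String) (completion_delimiter : String), Dom_split_by_multimarkers text record_delimiter completion_delimiter → Pre_split_by_multimarkers text record_delimiter completion_delimiter → Spec_split_by_multimarkers text record_delimiter completion_delimiter (split_by_multimarkers text record_delimiter completion_delimiter)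

-- ===== LEMMAS AND PROOFS =====

-- B's whole treatment of one raw record, as a named function (proof-side only)
def pvBone (r : List Char) : List (List Char) :=
  let s := PySem.Chars.strip r
  if s = [] then []
  else (pvSegments s).1.map pvClose ++
       (if (pvSegments s).2 = [] then [] else [(pvSegments s).2])

theorem pvSegments_nil : pvSegments [] = ([], []) := by
  rw [pvSegments]
  simp [show pvStray ([] : List Char) = -1 from by decide]

-- one step of A's loop handles the head record exactly as B's repair does
theorem pvA_loop_cons (n : Nat) : ∀ (r : List Char), r.length ≤ n → ∀ (rest : List (List Char)),
    pvA_loop (r :: rest) = pvBone r ++ pvA_loop rest := by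
  induction n with
  | zero =>
    intro r hr rest
    have h0 : (PySem.Chars.strip r).length = 0 := by have := pv_strip_len_le r; omega
    have hstrip : PySem.Chars.strip r = [] := List.length_eq_zero_iff.mp h0
    rw [pvA_loop]
    simp [pvBone, hstrip]
  | succ n ih =>
    intro r hr rest
    rw [pvA_loop]
    by_cases hrec : PySem.Chars.strip r = []
    · simp [pvBone, hrec]
    · simp only [hrec, dif_neg, not_false_iff]
      by_cases hin : (PySem.Chars.isIn pvEnt (PySem.List.slice (PySem.Chars.strip r) (some 10) none)
          || PySem.Chars.isIn pvRel (PySem.List.slice (PySem.Chars.strip r) (some 10) none)) = true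
      · by_cases hsw : PySem.Chars.startswith (PySem.Chars.strip r) pvOpen = true
        · by_cases hp : 0 < max (PySem.Chars.findFrom (PySem.Chars.strip r) pvEnt 10)
              (PySem.Chars.findFrom (PySem.Chars.strip r) pvRel 10)
          · -- repairable record: pvStray agrees with A's cut position
            have hstray : pvStray (PySem.Chars.strip r)
                = max (PySem.Chars.findFrom (PySem.Chars.strip r) pvEnt 10)
                      (PySem.Chars.findFrom (PySem.Chars.strip r) pvRel 10) := by
              simp [pvStray, hin, hsw, hp]
            have hseg : pvSegments (PySem.Chars.strip r)
                = (PySem.List.slice (PySem.Chars.strip r) none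
                     (some (max (PySem.Chars.findFrom (PySem.Chars.strip r) pvEnt 10)
                                (PySem.Chars.findFrom (PySem.Chars.strip r) pvRel 10)))
                    :: (pvSegments (PySem.Chars.strip (PySem.List.slice (PySem.Chars.strip r)
                        (some (max (PySem.Chars.findFrom (PySem.Chars.strip r) pvEnt 10)
                                   (PySem.Chars.findFrom (PySem.Chars.strip r) pvRel 10))) none))).1,
                   (pvSegments (PySem.Chars.strip (PySem.List.slice (PySem.Chars.strip r)
                        (some (max (PySem.Chars.findFrom (PySem.Chars.strip r) pvEnt 10)
                                   (PySem.Chars.findFrom (PySem.Chars.strip r) pvRel 10))) none))).2) := by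
              rw [pvSegments]
              simp only [hstray]
              simp [hp]
            simp only [hin, hsw, if_true, hp, dif_pos]
            by_cases hrs : PySem.Chars.strip (PySem.List.slice (PySem.Chars.strip r)
                (some (max (PySem.Chars.findFrom (PySem.Chars.strip r) pvEnt 10)
                  (PySem.Chars.findFrom (PySem.Chars.strip r) pvRel 10))) none) = []
            · -- remainder strips to empty: A drops it; B's phase 1 ends with an empty tail
              simp only [hrs, ne_eq, not_true_eq_false, if_false]
              rw [hrs, pvSegments_nil] at hseg
              rw [pvBone]
              simp [hrec, hseg, pvClose]
            · -- remainder survives: A re-enqueues it; B's phase 1 recurses on its strip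
              simp only [ne_eq, hrs, not_false_iff, if_true]
              have hlt := pv_rem_lt r _ hp hrec
              rw [ih _ (by omega) rest, pvBone, pvBone]
              simp [hrec, hrs, hseg, pvClose, List.append_assoc]
          · have hstray : pvStray (PySem.Chars.strip r) = -1 := by
              simp [pvStray, hin, hsw, hp]
            have hseg : pvSegments (PySem.Chars.strip r) = ([], PySem.Chars.strip r) := by
              rw [pvSegments]; simp [hstray]
            simp [hin, hsw, hp, pvBone, hrec, hseg]
        · have hstray : pvStray (PySem.Chars.strip r) = -1 := by
            simp [pvStray, hsw]
          have hseg : pvSegments (PySem.Chars.strip r) = ([], PySem.Chars.strip r) := by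
            rw [pvSegments]; simp [hstray]
          simp [hin, hsw, pvBone, hrec, hseg]
      · have h := Bool.of_not_eq_true hin
        have hstray : pvStray (PySem.Chars.strip r) = -1 := by
          simp [pvStray, h]
        have hseg : pvSegments (PySem.Chars.strip r) = ([], PySem.Chars.strip r) := by
          rw [pvSegments]; simp [hstray]
        simp [h, pvBone, hrec, hseg]

-- A's whole loop is B's repair of each original record, concatenated
theorem pvA_loop_eq_flatMap (rs : List (List Char)) :
    pvA_loop rs = rs.flatMap pvBone := by
  induction rs with
  | nil => rw [pvA_loop]; rfl
  | cons r rest ih =>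
    rw [pvA_loop_cons r.length r le_rfl rest, ih, List.flatMap_cons]

-- ===== VERDICT (by name: the statement is the Claim_ definition above) =====
theorem split_by_multimarkers_spec : Claim_equal_split_by_multimarkers := by
  intro text rd cd _ _
  unfold Spec_split_by_multimarkers split_by_multimarkers split_by_multimarkers_alt
  cases h1 : PySem.Str.split? text cd with
  | none => rfl
  | some parts =>
    simp only []
    cases h2 : PySem.Str.split? (if parts.length > 1 then (PySem.List.pyGet? parts 0).getD "" else text) rd with
    | none => rfl
    | some records =>
      simp only []
      rw [PySem.List.foldl_append_eq_flatMap, List.nil_append, pvA_loop_eq_flatMap,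
        List.flatMap_map]
      rfl
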